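-- pv_equiv track=rewrite | github.com/shireen-vir/FC-Assignment-Sem-2-AI | assignment_5_miss_cann.py | bfs
-- ===== SOURCE A (Python) =====
-- from collections import deque
--
-- def is_valid(state, total_m, total_c):
--     # state: (m_left, c_left, boat_side)
--     m_left, c_left, _ = state
--     m_right = total_m - m_left
--     c_right = total_c - c_left
--
--     # Check for negative numbers or numbers exceeding total
--     if m_left < 0 or c_left < 0 or m_left > total_m or c_left > total_c:
--         return False
--
--     # On left bank: if there are missionaries, they should not be outnumbered
--     if m_left > 0 and m_left < c_left:
--         return False
--     # On right bank: if there are missionaries, they should not be outnumbered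
--     if m_right > 0 and m_right < c_right:
--         return False
--
--     return True
--
-- def get_successors(state, total_m, total_c, boat_capacity):
--     successors = []
--     m_left, c_left, boat = state
--     # if boat is on left bank, move from left to right; else vice versa
--     direction = -1 if boat == 0 else 1
--
--     # Try all possible moves with 1 to boat_capacity people
--     for m in range(boat_capacity + 1):
--         for c in range(boat_capacity + 1):
--             if m + c == 0 or m + c > boat_capacity:
--                 continue
--             # Depending on boat side, subtract or add the numbers
--             if boat == 0:
--                 new_state = (m_left - m, c_left - c, 1)
--             else:
--                 new_state = (m_left + m, c_left + c, 0)
--             if is_valid(new_state, total_m, total_c):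
--                 successors.append(((m, c), new_state))
--     return successors
--
-- def bfs(initial_state, total_m, total_c, boat_capacity):
--     # Queue holds tuples: (state, path) where path is a list of (move, state) tuples
--     queue = deque()
--     queue.append((initial_state, []))
--     visited = set()
--     visited.add(initial_state)
--
--     while queue:
--         state, path = queue.popleft()
--         # Check if goal reached: all on the right bank
--         if state[0] == 0 and state[1] == 0 and state[2] == 1:
--             return path
--
--         for move, next_state in get_successors(state, total_m, total_c, boat_capacity):
--             if next_state not in visited:
--                 visited.add(next_state)
--                 # Append move details and next state to path
--                 queue.append((next_state, path + [(move, next_state)]))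
--     return None
-- ===== SOURCE B (Python) =====
-- from collections import deque
--
-- def is_valid(state, total_m, total_c):
--     m_left, c_left, _ = state
--     m_right = total_m - m_left
--     c_right = total_c - c_left
--     if m_left < 0 or c_left < 0 or m_left > total_m or c_left > total_c:
--         return False
--     if m_left > 0 and m_left < c_left:
--         return False
--     if m_right > 0 and m_right < c_right:
--         return False
--     return True
--
-- def get_successors(state, total_m, total_c, boat_capacity):
--     successors = []
--     m_left, c_left, boat = state
--     for m in range(boat_capacity + 1):
--         for c in range(boat_capacity + 1):
--             if m + c == 0 or m + c > boat_capacity: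
--                 continue
--             if boat == 0:
--                 new_state = (m_left - m, c_left - c, 1)
--             else:
--                 new_state = (m_left + m, c_left + c, 0)
--             if is_valid(new_state, total_m, total_c):
--                 successors.append(((m, c), new_state))
--     return successors
--
-- def bfs(initial_state, total_m, total_c, boat_capacity):
--     # BFS over states only: instead of copying the whole path into every queue
--     # entry, remember for each discovered state the (move, predecessor) that
--     # reached it and rebuild the path once when the goal is popped.
--     queue = deque([initial_state])
--     visited = {initial_state}
--     parent = {}  # state -> (move, previous state)
--     while queue:
--         state = queue.popleft()
--         if state[0] == 0 and state[1] == 0 and state[2] == 1: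
--             moves = []
--             cur = state
--             while cur in parent:
--                 mv, prev = parent[cur]
--                 moves.append((mv, cur))
--                 cur = prev
--             moves.reverse()
--             return moves
--         for move, next_state in get_successors(state, total_m, total_c, boat_capacity):
--             if next_state not in visited:
--                 visited.add(next_state)
--                 parent[next_state] = (move, state)
--                 queue.append(next_state)
--     return None
-- ===== Notes on version B (the rewrite author's own statement) =====
-- stated objective: alternative
-- what changed: A's BFS carries a full copy of the path in every queue entry (path + [..] per enqueue); B enqueues bare states, records one (move, predecessor) pointer per discovered state, and reconstructs the path once when the goal is popped; less copying per enqueue, but a timing run measured no speedup on the generated inputs.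
import Mathlib
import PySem

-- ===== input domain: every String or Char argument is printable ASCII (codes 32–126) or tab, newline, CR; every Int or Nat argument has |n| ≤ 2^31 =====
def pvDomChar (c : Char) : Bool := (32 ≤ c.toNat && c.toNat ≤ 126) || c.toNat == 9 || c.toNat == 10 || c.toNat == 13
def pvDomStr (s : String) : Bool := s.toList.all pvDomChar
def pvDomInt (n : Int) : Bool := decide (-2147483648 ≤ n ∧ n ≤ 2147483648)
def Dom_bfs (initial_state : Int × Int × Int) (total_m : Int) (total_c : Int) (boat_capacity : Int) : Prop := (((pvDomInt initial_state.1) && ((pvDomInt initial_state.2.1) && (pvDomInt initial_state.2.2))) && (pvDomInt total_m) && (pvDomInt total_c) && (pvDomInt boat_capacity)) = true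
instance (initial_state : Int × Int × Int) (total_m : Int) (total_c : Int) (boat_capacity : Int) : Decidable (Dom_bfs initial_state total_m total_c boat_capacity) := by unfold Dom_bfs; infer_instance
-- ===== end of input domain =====

-- B replaces A's path-copying BFS (a full path copied into every queue entry) by a BFS over bare
-- states with one (move, predecessor) pointer per discovered state, reconstructing the path once
-- at the goal; objective: alternative algorithm (parent pointers instead of per-entry path copies).


-- ===== PORT A =====
def is_valid (state : Int × Int × Int) (total_m : Int) (total_c : Int) : Bool :=
  let m_left := state.1
  let c_left := state.2.1
  let m_right := total_m - m_left
  let c_right := total_c - c_left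
  if m_left < 0 || c_left < 0 || m_left > total_m || c_left > total_c then false
  else if m_left > 0 && m_left < c_left then false
  else if m_right > 0 && m_right < c_right then false
  else true

def get_successors (state : Int × Int × Int) (total_m : Int) (total_c : Int) (boat_capacity : Int) :
    List ((Int × Int) × (Int × Int × Int)) :=
  let m_left := state.1
  let c_left := state.2.1
  let boat := state.2.2
  (PySem.List.pyRange 0 (boat_capacity + 1) 1).foldl (fun successors m =>
    (PySem.List.pyRange 0 (boat_capacity + 1) 1).foldl (fun successors c =>
      if m + c == 0 || m + c > boat_capacity then successors
      else
        let new_state : Int × Int × Int :=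
          if boat == 0 then (m_left - m, c_left - c, 1) else (m_left + m, c_left + c, 0)
        if is_valid new_state total_m total_c then successors ++ [((m, c), new_state)]
        else successors) successors) []

-- shared totality guard: the loop pops each distinct state at most once, so
-- 2*(total_m+1)*(total_c+1)+2 iterations always suffice (the Python loop terminates for the same reason)
def bfsFuel (total_m total_c : Int) : Nat := (total_m.toNat + 1) * (total_c.toNat + 1) * 2 + 2

def bfsLoopA (total_m total_c boat_capacity : Int) :
    Nat → List ((Int × Int × Int) × List ((Int × Int) × (Int × Int × Int))) →
    PySem.Set (Int × Int × Int) → Option (List ((Int × Int) × (Int × Int × Int)))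
  | 0, _, _ => none
  | _ + 1, [], _ => none
  | fuel + 1, (state, path) :: rest, visited =>
    if state.1 == 0 && state.2.1 == 0 && state.2.2 == 1 then some path
    else
      let step := (get_successors state total_m total_c boat_capacity).foldl
        (fun qv ms =>
          if PySem.Set.contains qv.2 ms.2 then qv
          else (qv.1 ++ [(ms.2, path ++ [ms])], PySem.Set.add qv.2 ms.2)) (rest, visited)
      bfsLoopA total_m total_c boat_capacity fuel step.1 step.2

def bfs (initial_state : Int × Int × Int) (total_m : Int) (total_c : Int) (boat_capacity : Int) : Option (List ((Int × Int) × (Int × Int × Int))) :=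
  bfsLoopA total_m total_c boat_capacity (bfsFuel total_m total_c)
    [(initial_state, [])] (PySem.Set.ofList [initial_state])

-- ===== PORT B =====
-- walk the parent pointers from the goal back to the start ('while cur in parent'); the fuel
-- parent.size + 1 is a totality guard only (the chain visits distinct parent keys)
def reconstructLoop (parent : PySem.Dict (Int × Int × Int) ((Int × Int) × (Int × Int × Int))) :
    Nat → (Int × Int × Int) → List ((Int × Int) × (Int × Int × Int)) →
    List ((Int × Int) × (Int × Int × Int))
  | 0, _, moves => moves
  | fuel + 1, cur, moves =>
    match parent.get? cur with
    | none => moves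
    | some (mv, prev) => reconstructLoop parent fuel prev (moves ++ [(mv, cur)])

def bfsLoopB (total_m total_c boat_capacity : Int) :
    Nat → List (Int × Int × Int) → PySem.Set (Int × Int × Int) →
    PySem.Dict (Int × Int × Int) ((Int × Int) × (Int × Int × Int)) →
    Option (List ((Int × Int) × (Int × Int × Int)))
  | 0, _, _, _ => none
  | _ + 1, [], _, _ => none
  | fuel + 1, state :: rest, visited, parent =>
    if state.1 == 0 && state.2.1 == 0 && state.2.2 == 1 then
      some (reconstructLoop parent (parent.size + 1) state []).reverse
    else
      let step := (get_successors state total_m total_c boat_capacity).foldl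
        (fun qvp ms =>
          if PySem.Set.contains qvp.2.1 ms.2 then qvp
          else (qvp.1 ++ [ms.2], PySem.Set.add qvp.2.1 ms.2,
                PySem.Dict.insert qvp.2.2 ms.2 (ms.1, state))) (rest, visited, parent)
      bfsLoopB total_m total_c boat_capacity fuel step.1 step.2.1 step.2.2

def bfs_alt (initial_state : Int × Int × Int) (total_m : Int) (total_c : Int) (boat_capacity : Int) : Option (List ((Int × Int) × (Int × Int × Int))) :=
  bfsLoopB total_m total_c boat_capacity (bfsFuel total_m total_c)
    [initial_state] (PySem.Set.ofList [initial_state]) PySem.Dict.empty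

-- ===== PRECONDITION & SPEC =====
def Spec_bfs (initial_state : Int × Int × Int) (total_m : Int) (total_c : Int) (boat_capacity : Int) (out : Option (List ((Int × Int) × (Int × Int × Int)))) : Prop := out = bfs_alt initial_state total_m total_c boat_capacity
instance (initial_state : Int × Int × Int) (total_m : Int) (total_c : Int) (boat_capacity : Int) (out : Option (List ((Int × Int) × (Int × Int × Int)))) : Decidable (Spec_bfs initial_state total_m total_c boat_capacity out) := by unfold Spec_bfs; infer_instance

-- ===== CLAIM (what is proved, stated in full; the proofs are below) =====
def Claim_equal_bfs : Prop := ∀ (initial_state : Int × Int × Int) (total_m : Int) (total_c : Int) (boat_capacity : Int), Dom_bfs initial_state total_m total_c boat_capacity → Spec_bfs initial_state total_m total_c boat_capacity (bfs initial_state total_m total_c boat_capacity)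

-- ===== LEMMAS AND PROOFS =====

-- a (reversed) path R ending at s is correctly recorded in the parent map, all its states visited
def GoodRev (parent : PySem.Dict (Int × Int × Int) ((Int × Int) × (Int × Int × Int)))
    (visited : PySem.Set (Int × Int × Int)) :
    (Int × Int × Int) → List ((Int × Int) × (Int × Int × Int)) → Prop
  | s, [] => s ∈ visited ∧ parent.get? s = none
  | s, e :: rest => e.2 = s ∧ s ∈ visited ∧
      ∃ prev, parent.get? s = some (e.1, prev) ∧ GoodRev parent visited prev rest

def KeysSub (parent : PySem.Dict (Int × Int × Int) ((Int × Int) × (Int × Int × Int)))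
    (visited : PySem.Set (Int × Int × Int)) : Prop :=
  ∀ k, parent.contains k = true → k ∈ visited

def Good (parent : PySem.Dict (Int × Int × Int) ((Int × Int) × (Int × Int × Int)))
    (visited : PySem.Set (Int × Int × Int))
    (entry : (Int × Int × Int) × List ((Int × Int) × (Int × Int × Int))) : Prop :=
  GoodRev parent visited entry.1 entry.2.reverse ∧ entry.2.length ≤ parent.size

lemma goodRev_mono (parent : PySem.Dict (Int × Int × Int) ((Int × Int) × (Int × Int × Int)))
    (visited visited' : PySem.Set (Int × Int × Int)) (ns : Int × Int × Int)
    (v : (Int × Int) × (Int × Int × Int)) (hns : ns ∉ visited)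
    (hsub : ∀ x, x ∈ visited → x ∈ visited') :
    ∀ s R, GoodRev parent visited s R → GoodRev (parent.insert ns v) visited' s R := by
  intro s R
  induction R generalizing s with
  | nil =>
    intro ⟨hv, hg⟩
    have hne : s ≠ ns := fun h => hns (h ▸ hv)
    refine ⟨hsub _ hv, ?_⟩
    rw [PySem.Dict.get?_insert_of_ne _ _ hne]; exact hg
  | cons e rest ih =>
    rintro ⟨he, hv, prev, hg, hrest⟩
    have hne : s ≠ ns := fun h => hns (h ▸ hv)
    refine ⟨he, hsub _ hv, prev, ?_, ih _ hrest⟩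
    rw [PySem.Dict.get?_insert_of_ne _ _ hne]; exact hg

lemma reconstruct_of_goodRev (parent : PySem.Dict (Int × Int × Int) ((Int × Int) × (Int × Int × Int)))
    (visited : PySem.Set (Int × Int × Int)) :
    ∀ R s fuel acc, GoodRev parent visited s R → R.length < fuel →
      reconstructLoop parent fuel s acc = acc ++ R := by
  intro R
  induction R with
  | nil =>
    intro s fuel acc ⟨_, hg⟩ hf
    cases fuel with
    | zero => omega
    | succ f => simp [reconstructLoop, hg]
  | cons e rest ih =>
    rintro s fuel acc ⟨he, _, prev, hg, hrest⟩ hf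
    cases fuel with
    | zero => simp at hf
    | succ f =>
      simp only [reconstructLoop, hg]
      rw [ih prev f (acc ++ [(e.1, s)]) hrest (by simpa using Nat.lt_of_succ_lt_succ hf)]
      simp [← he]

-- one pass over the successor list preserves the whole invariant and keeps the queues aligned
lemma fold_eq (state : Int × Int × Int)
    (path : List ((Int × Int) × (Int × Int × Int))) :
    ∀ (L : List ((Int × Int) × (Int × Int × Int)))
      (qA : List ((Int × Int × Int) × List ((Int × Int) × (Int × Int × Int))))
      (visited : PySem.Set (Int × Int × Int))
      (parent : PySem.Dict (Int × Int × Int) ((Int × Int) × (Int × Int × Int))),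
      KeysSub parent visited → (∀ e ∈ qA, Good parent visited e) →
      Good parent visited (state, path) →
      (let rA := L.foldl (fun qv ms =>
          if PySem.Set.contains qv.2 ms.2 then qv
          else (qv.1 ++ [(ms.2, path ++ [ms])], PySem.Set.add qv.2 ms.2)) (qA, visited)
       let rB := L.foldl (fun qvp ms =>
          if PySem.Set.contains qvp.2.1 ms.2 then qvp
          else (qvp.1 ++ [ms.2], PySem.Set.add qvp.2.1 ms.2,
                PySem.Dict.insert qvp.2.2 ms.2 (ms.1, state))) (qA.map Prod.fst, visited, parent)
       rA.1.map Prod.fst = rB.1 ∧ rA.2 = rB.2.1 ∧ KeysSub rB.2.2 rB.2.1 ∧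
         (∀ e ∈ rA.1, Good rB.2.2 rB.2.1 e) ∧ Good rB.2.2 rB.2.1 (state, path)) := by
  intro L
  induction L with
  | nil =>
    intro qA visited parent hK hq hp
    exact ⟨rfl, rfl, hK, hq, hp⟩
  | cons ms L ih =>
    intro qA visited parent hK hq hp
    simp only [List.foldl_cons]
    by_cases hc : PySem.Set.contains visited ms.2 = true
    · simp only [hc, if_true]
      exact ih qA visited parent hK hq hp
    · simp only [Bool.not_eq_true] at hc
      simp only [hc, Bool.false_eq_true, if_false]
      have hns : ms.2 ∉ visited := by simpa using hc
      have hpc : parent.contains ms.2 = false := by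
        cases hcc : parent.contains ms.2 with
        | false => rfl
        | true => exact absurd (hK _ hcc) hns
      have hsize : (parent.insert ms.2 (ms.1, state)).size = parent.size + 1 := by
        simp [PySem.Dict.size_insert, hpc]
      have hsub : ∀ x, x ∈ visited → x ∈ PySem.Set.add visited ms.2 := fun x hx =>
        (PySem.Set.mem_add _ _ _).mpr (Or.inl hx)
      have hK' : KeysSub (parent.insert ms.2 (ms.1, state)) (PySem.Set.add visited ms.2) := by
        intro k hk
        rw [PySem.Dict.contains_insert] at hk
        rcases Bool.or_eq_true_iff.mp hk with h | h
        · exact (PySem.Set.mem_add _ _ _).mpr (Or.inr (by simpa using h))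
        · exact hsub _ (hK _ h)
      have hgood : ∀ e, Good parent visited e →
          Good (parent.insert ms.2 (ms.1, state)) (PySem.Set.add visited ms.2) e := by
        rintro e ⟨hg, hl⟩
        exact ⟨goodRev_mono parent visited _ ms.2 (ms.1, state) hns hsub _ _ hg,
          by rw [hsize]; omega⟩
      have hnew : Good (parent.insert ms.2 (ms.1, state)) (PySem.Set.add visited ms.2)
          (ms.2, path ++ [ms]) := by
        refine ⟨?_, by
          have h2 : path.length ≤ parent.size := hp.2
          simp only [List.length_append, List.length_cons, List.length_nil, hsize]; omega⟩
        show GoodRev _ _ ms.2 (path ++ [ms]).reverse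
        rw [List.reverse_append, List.reverse_singleton, List.singleton_append]
        exact ⟨rfl, (PySem.Set.mem_add _ _ _).mpr (Or.inr rfl),
          state, PySem.Dict.get?_insert_self _ _ _,
          goodRev_mono parent visited _ ms.2 (ms.1, state) hns hsub _ _ hp.1⟩
      have := ih (qA ++ [(ms.2, path ++ [ms])]) (PySem.Set.add visited ms.2)
        (parent.insert ms.2 (ms.1, state)) hK'
        (by
          intro e he
          rcases List.mem_append.mp he with h | h
          · exact hgood e (hq e h)
          · simp at h; subst h; exact hnew)
        (hgood _ hp)
      simpa using this

lemma loop_eq (total_m total_c boat_capacity : Int) :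
    ∀ (fuel : Nat) (qA : List ((Int × Int × Int) × List ((Int × Int) × (Int × Int × Int))))
      (visited : PySem.Set (Int × Int × Int))
      (parent : PySem.Dict (Int × Int × Int) ((Int × Int) × (Int × Int × Int))),
      KeysSub parent visited → (∀ e ∈ qA, Good parent visited e) →
      bfsLoopA total_m total_c boat_capacity fuel qA visited =
        bfsLoopB total_m total_c boat_capacity fuel (qA.map Prod.fst) visited parent := by
  intro fuel
  induction fuel with
  | zero => intro qA visited parent _ _; rfl
  | succ fuel ih =>
    intro qA visited parent hK hq
    cases qA with
    | nil => rfl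
    | cons hd rest =>
      obtain ⟨state, path⟩ := hd
      simp only [List.map_cons, bfsLoopA, bfsLoopB]
      by_cases hgoal : (state.1 == 0 && state.2.1 == 0 && state.2.2 == 1) = true
      · simp only [hgoal, if_true]
        have hhd := hq (state, path) (List.mem_cons_self ..)
        obtain ⟨hg, hl⟩ := hhd
        rw [reconstruct_of_goodRev parent visited path.reverse state (parent.size + 1) [] hg
          (by simp; omega)]
        simp
      · simp only [hgoal, Bool.false_eq_true, if_false]
        have hfold := fold_eq state path
          (get_successors state total_m total_c boat_capacity) rest visited parent hK
          (fun e he => hq e (List.mem_cons_of_mem _ he))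
          (hq (state, path) (List.mem_cons_self ..))
        obtain ⟨h1, h2, h3, h4, _⟩ := hfold
        rw [← h2] at h3 h4
        rw [← h1, ← h2]
        exact ih _ _ _ h3 h4

-- ===== VERDICT (by name: the statement is the Claim_ definition above) =====
theorem bfs_spec : Claim_equal_bfs := by
  intro initial_state total_m total_c boat_capacity _
  unfold Spec_bfs bfs bfs_alt
  have h := loop_eq total_m total_c boat_capacity (bfsFuel total_m total_c)
    [(initial_state, [])] (PySem.Set.ofList [initial_state]) PySem.Dict.empty
    (by intro k hk; simp [PySem.Dict.contains_empty] at hk)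
    (by
      rintro e he
      simp at he; subst he
      exact ⟨⟨by simp [PySem.Set.mem_ofList], PySem.Dict.get?_empty _⟩, by simp⟩)
  simpa using h
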